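-- pv_equiv track=rewrite | github.com/vasily-esipenko/Kata | Python/encrypt_this.py | encrypt_this
-- ===== SOURCE A (Python) =====
-- def encrypt_this(text):
--     words = text.split(" ")
--     res = []
--     for i in words:
--         new = ""
--         temp = ""
--         for j in range(len(i)):
--           if j == 0:
--             new += str(ord(i[j]))
--           elif j == 1:
--             temp = i[j]
--             new += i[-1]
--           elif j == len(i) - 1:
--             new += temp
--           else:
--             new += i[j]
--         res.append(new)
--     return " ".join(list(filter(None, res)))
-- ===== SOURCE B (Python) =====
-- def encrypt_this(text):
--     res = []
--     for word in text.split(" "):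
--         if not word:
--             res.append("")
--             continue
--         rest = list(word[1:])
--         if len(rest) >= 2:
--             rest[0], rest[-1] = rest[-1], rest[0]
--         res.append(str(ord(word[0])) + "".join(rest))
--     return " ".join(filter(None, res))
-- ===== Notes on version B (the rewrite author's own statement) =====
-- stated objective: simpler
-- what changed: Replaces A's stateful per-character index loop with its deferred-swap temp variable by a direct slice-and-swap: take word[1:], exchange its first and last characters when it has at least two, and prepend str(ord(word[0])).
import Mathlib
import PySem

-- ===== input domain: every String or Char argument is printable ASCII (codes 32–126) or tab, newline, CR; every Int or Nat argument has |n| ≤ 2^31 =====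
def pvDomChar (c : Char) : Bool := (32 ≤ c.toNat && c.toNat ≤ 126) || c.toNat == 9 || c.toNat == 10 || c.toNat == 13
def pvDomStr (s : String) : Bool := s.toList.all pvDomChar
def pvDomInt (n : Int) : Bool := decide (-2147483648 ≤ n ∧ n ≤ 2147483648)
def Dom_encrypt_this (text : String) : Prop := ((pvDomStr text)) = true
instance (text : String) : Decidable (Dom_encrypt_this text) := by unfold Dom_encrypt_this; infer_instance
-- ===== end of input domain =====

-- B replaces A's stateful per-character index loop (with its deferred-swap temp) by a direct
-- slice-and-swap of word[1:]; objective: simpler. Return-value equivalence; neither mutates input.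

-- ===== PORT A =====
-- the body of A's inner 'for j in range(len(i))' loop, state (new, temp)
def pvStepA (i : List Char) (st : List Char × List Char) (j : Int) : List Char × List Char :=
  if j = 0 then (st.1 ++ PySem.Int.toChars ((PySem.List.pyGetD i j ' ').toNat : Int), st.2)
  else if j = 1 then (st.1 ++ [PySem.List.pyGetD i (-1) ' '], [PySem.List.pyGetD i j ' '])
  else if j = (i.length : Int) - 1 then (st.1 ++ st.2, st.2)
  else (st.1 ++ [PySem.List.pyGetD i j ' '], st.2)

def encrypt_this (text : String) : String :=
  let words := PySem.Chars.splitOn text.toList [' ']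
  let res := words.foldl (fun res i =>
    res ++ [((PySem.List.pyRange 0 (i.length : Int) 1).foldl (pvStepA i) ([], [])).1]) []
  String.ofList (PySem.Chars.join [' '] (res.filter (fun w => decide (w ≠ []))))

-- ===== PORT B =====
def pvEncWordB (word : List Char) : List Char :=
  if word = [] then []
  else
    let first := PySem.Int.toChars ((PySem.List.pyGetD word 0 ' ').toNat : Int)
    let rest := PySem.List.slice word (some 1) none
    let rest :=
      if 2 ≤ rest.length then
        -- rest[0], rest[-1] = rest[-1], rest[0]
        PySem.List.pySetD (PySem.List.pySetD rest 0 (PySem.List.pyGetD rest (-1) ' '))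
          ((rest.length : Int) - 1) (PySem.List.pyGetD rest 0 ' ')
      else rest
    first ++ rest

def encrypt_this_alt (text : String) : String :=
  let res := (PySem.Chars.splitOn text.toList [' ']).map pvEncWordB
  String.ofList (PySem.Chars.join [' '] (res.filter (fun w => decide (w ≠ []))))

-- ===== PRECONDITION & SPEC =====
def Spec_encrypt_this (text : String) (out : String) : Prop := out = encrypt_this_alt text
instance (text : String) (out : String) : Decidable (Spec_encrypt_this text out) := by unfold Spec_encrypt_this; infer_instance

-- ===== CLAIM (what is proved, stated in full; the proofs are below) =====
def Claim_equal_encrypt_this : Prop := ∀ (text : String), Dom_encrypt_this text → Spec_encrypt_this text (encrypt_this text)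

-- ===== LEMMAS AND PROOFS =====

-- last-position update of a concatenation
theorem pvSetLast {α : Type} (xs : List α) (z b : α) :
    (xs ++ [z]).set xs.length b = xs ++ [b] := by
  induction xs with
  | nil => simp
  | cons h t ih => simp [ih]

-- the middle of A's loop (indices 2 ≤ j < len-1) only appends i[j]
theorem pvFoldMidAux (i : List Char) : ∀ (k : Nat) (a : Int) (new temp : List Char), 2 ≤ a →
    ((i.length : Int) - 1 - a).toNat = k →
    (PySem.List.pyRange a ((i.length : Int) - 1) 1).foldl (pvStepA i) (new, temp)
      = (new ++ (PySem.List.pyRange a ((i.length : Int) - 1) 1).map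
          (fun j => PySem.List.pyGetD i j ' '), temp) := by
  intro k
  induction k with
  | zero =>
    intro a new temp ha hk
    rw [PySem.List.pyRange_one_eq_nil (by omega)]
    simp
  | succ k ih =>
    intro a new temp ha hk
    have h : a < (i.length : Int) - 1 := by omega
    rw [PySem.List.pyRange_one_cons h]
    simp only [List.foldl_cons, List.map_cons]
    have hstep : pvStepA i (new, temp) a = (new ++ [PySem.List.pyGetD i a ' '], temp) := by
      unfold pvStepA
      rw [if_neg (by omega), if_neg (by omega), if_neg (by omega)]
    rw [hstep, ih (a + 1) _ temp (by omega) (by omega)]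
    simp

theorem pvFoldMid (i : List Char) (a : Int) (new temp : List Char) (ha : 2 ≤ a) :
    (PySem.List.pyRange a ((i.length : Int) - 1) 1).foldl (pvStepA i) (new, temp)
      = (new ++ (PySem.List.pyRange a ((i.length : Int) - 1) 1).map
          (fun j => PySem.List.pyGetD i j ' '), temp) :=
  pvFoldMidAux i _ a new temp ha rfl

-- pyGetD on the left part of a concatenation
theorem pvGetDAppendLeft (xs ys : List Char) (j : Int) (h0 : 0 ≤ j) (h : j < (xs.length : Int)) :
    PySem.List.pyGetD (xs ++ ys) j ' ' = PySem.List.pyGetD xs j ' ' := by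
  obtain ⟨n, rfl⟩ : ∃ n : Nat, j = (n : Int) := ⟨j.toNat, by omega⟩
  have hn : n < xs.length := by exact_mod_cast h
  simp [List.getD_eq_getElem?_getD, List.getElem?_append_left hn]

-- per-word agreement
theorem pvWordEq (i : List Char) :
    ((PySem.List.pyRange 0 (i.length : Int) 1).foldl (pvStepA i) ([], [])).1 = pvEncWordB i := by
  match i with
  | [] =>
    simp [pvEncWordB, PySem.List.pyRange_one_eq_nil]
  | [x] =>
    rw [show ((([x] : List Char).length : Int)) = 1 by simp]
    rw [PySem.List.pyRange_one_cons (by omega), PySem.List.pyRange_one_eq_nil (by omega)]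
    simp [pvStepA, pvEncWordB, PySem.List.slice_from_one]
  | [x, y] =>
    rw [show ((([x, y] : List Char).length : Int)) = 2 by simp]
    rw [PySem.List.pyRange_one_cons (by omega), PySem.List.pyRange_one_cons (by omega),
        PySem.List.pyRange_one_eq_nil (by omega)]
    simp [pvStepA, pvEncWordB, PySem.List.slice_from_one, PySem.List.pyGetD_zero_cons]
    rw [show ([x, y] : List Char) = [x] ++ [y] by simp, PySem.List.pyGetD_neg_one_append_singleton]
  | x :: y :: c :: t =>
    -- write the tail c :: t as m ++ [z] (last character z)
    obtain ⟨m, z, hct⟩ : ∃ m z, c :: t = m ++ [z] :=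
      ⟨(c :: t).dropLast, (c :: t).getLast (by simp),
        (List.dropLast_append_getLast (by simp)).symm⟩
    have ht : t.length = m.length := by
      have := congrArg List.length hct
      simp at this
      omega
    have hi : (x :: y :: c :: t : List Char) = (x :: y :: m) ++ [z] := by simp [hct]
    rw [hi]
    have hlen : (((x :: y :: m) ++ [z] : List Char).length : Int) = (m.length : Int) + 3 := by
      simp
      ring
    rw [hlen]
    rw [PySem.List.pyRange_one_cons (by omega)]
    rw [PySem.List.pyRange_one_cons (by omega)]
    rw [show (m.length : Int) + 3 = ((m.length : Int) + 2) + 1 from by ring]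
    rw [PySem.List.pyRange_one_succ_right (by omega)]
    simp only [List.foldl_cons, List.foldl_append]
    have h0 : pvStepA ((x :: y :: m) ++ [z]) ([], []) 0
        = (PySem.Int.toChars (x.toNat : Int), []) := by
      simp [pvStepA, PySem.List.pyGetD_zero_cons]
    have h1 : ∀ st : List Char × List Char, pvStepA ((x :: y :: m) ++ [z]) st (0 + 1)
        = (st.1 ++ [z], [y]) := by
      intro st
      unfold pvStepA
      rw [if_neg (by omega), if_pos (by omega)]
      rw [PySem.List.pyGetD_neg_one_append_singleton]
      rw [show PySem.List.pyGetD ((x :: y :: m) ++ [z]) (0 + 1) ' ' = y from by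
        norm_num
        simp [PySem.List.pyGetD_ofNat']]
    have hb : (m.length : Int) + 2 = (((x :: y :: m) ++ [z] : List Char).length : Int) - 1 := by
      rw [hlen]
      ring
    have h3 : ∀ st : List Char × List Char,
        pvStepA ((x :: y :: m) ++ [z]) st ((((x :: y :: m) ++ [z] : List Char).length : Int) - 1)
          = (st.1 ++ st.2, st.2) := by
      intro st
      unfold pvStepA
      rw [if_neg (by rw [hlen]; omega), if_neg (by rw [hlen]; omega), if_pos rfl]
    rw [h0, h1, hb, pvFoldMid _ _ _ _ (by omega), h3]
    have hmap : (PySem.List.pyRange (0 + 1 + 1) ((((x :: y :: m) ++ [z] : List Char).length : Int) - 1)).map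
        (fun j => PySem.List.pyGetD ((x :: y :: m) ++ [z]) j ' ') = m := by
      have hb2 : ((((x :: y :: m) ++ [z] : List Char).length : Int) - 1) = ((x :: y :: m : List Char).length : Int) := by
        simp
      rw [hb2]
      calc (PySem.List.pyRange (0 + 1 + 1) ((x :: y :: m : List Char).length : Int)).map
            (fun j => PySem.List.pyGetD ((x :: y :: m) ++ [z]) j ' ')
          = (PySem.List.pyRange (0 + 1 + 1) ((x :: y :: m : List Char).length : Int)).map
            (fun j => PySem.List.pyGetD (x :: y :: m) j ' ') := by
            apply List.map_congr_left
            intro j hj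
            have hj' := PySem.List.mem_pyRange_one.mp hj
            exact pvGetDAppendLeft _ _ _ (by omega) (by omega)
        _ = m := by
            rw [PySem.List.map_pyGetD_pyRange' (x :: y :: m) ' ' (by omega)]
            simp
    rw [hmap]
    have hB : pvEncWordB ((x :: y :: m) ++ [z])
        = PySem.Int.toChars (x.toNat : Int) ++ (z :: (m ++ [y])) := by
      unfold pvEncWordB
      rw [if_neg (by simp)]
      simp only [PySem.List.slice_from_one, List.cons_append, List.tail_cons]
      rw [if_pos (by simp)]
      rw [show PySem.List.pyGetD (y :: (m ++ [z])) (-1) ' ' = z from by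
        rw [show y :: (m ++ [z]) = (y :: m) ++ [z] from by simp,
            PySem.List.pyGetD_neg_one_append_singleton]]
      rw [show PySem.List.pyGetD (y :: (m ++ [z])) 0 ' ' = y from by
        simp [PySem.List.pyGetD_zero_cons]]
      rw [show PySem.List.pyGetD (x :: y :: (m ++ [z])) 0 ' ' = x from by
        simp [PySem.List.pyGetD_zero_cons]]
      rw [PySem.List.pySetD_of_nonneg (y :: (m ++ [z])) z (by omega)]
      rw [show ((y :: (m ++ [z]) : List Char).set (0 : Int).toNat z) = z :: (m ++ [z]) from by simp]
      rw [PySem.List.pySetD_of_nonneg (z :: (m ++ [z])) y (by simp; omega)]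
      rw [show (((y :: (m ++ [z]) : List Char).length : Int) - 1).toNat = m.length + 1 from by
        simp]
      rw [show (z :: (m ++ [z]) : List Char).set (m.length + 1) y = z :: (m ++ [y]) from by
        rw [List.set_cons_succ, pvSetLast]]
    rw [hB]
    simp


-- ===== VERDICT (by name: the statement is the Claim_ definition above) =====
theorem encrypt_this_spec : Claim_equal_encrypt_this := by
  intro text _
  unfold Spec_encrypt_this encrypt_this encrypt_this_alt
  dsimp only
  rw [PySem.List.foldl_append_singleton_eq_map]
  simp [pvWordEq]
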